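-- pv_equiv track=rewrite | github.com/AndrewFSee/energy-trading-ai | src/rag/retriever.py | format_context
-- ===== SOURCE A (Python) =====
-- def format_context(chunks: list[dict], max_tokens: int = 3000) -> str:
--     """Format retrieved chunks into a context string for the LLM.
--
--     Args:
--         chunks: List of retrieved chunk dictionaries.
--         max_tokens: Approximate maximum context length in characters.
--
--     Returns:
--         Formatted context string with source citations.
--     """
--     context_parts = []
--     total_chars = 0
--     for i, chunk in enumerate(chunks, 1):
--         source = chunk.get("filename", "Unknown")
--         page = chunk.get("page_number", "?")
--         text = chunk.get("text", "")
--         part = f"[{i}] Source: {source} (page {page})\n{text}"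
--         if total_chars + len(part) > max_tokens * 4:  # ~4 chars per token
--             break
--         context_parts.append(part)
--         total_chars += len(part)
--     return "\n\n---\n\n".join(context_parts)
-- ===== SOURCE B (Python) =====
-- from bisect import bisect_right
-- from itertools import accumulate
--
--
-- def format_context(chunks: list[dict], max_tokens: int = 3000) -> str:
--     """Format retrieved chunks into a context string for the LLM.
--
--     Binary-search variant: since part lengths are nonnegative, the cumulative
--     lengths are nondecreasing, so the greedy cutoff (largest prefix whose total
--     stays within the budget) is exactly bisect_right(cums, budget).
--     """
--     parts = [
--         f"[{i}] Source: {c.get('filename', 'Unknown')} (page {c.get('page_number', '?')})\n{c.get('text', '')}"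
--         for i, c in enumerate(chunks, 1)
--     ]
--     cums = list(accumulate(len(p) for p in parts))
--     cutoff = bisect_right(cums, max_tokens * 4)
--     return "\n\n---\n\n".join(parts[:cutoff])
-- ===== Notes on version B (the rewrite author's own statement) =====
-- stated objective: alternative
-- what changed: B replaces A's linear scan-with-break by a different search algorithm: it formats all parts, prefix-sums their lengths, and finds the cutoff by BINARY SEARCH (bisect_right) on the monotone prefix sums, then joins that prefix; correct because part lengths are nonnegative so the cumulative sums are nondecreasing.
import Mathlib
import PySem

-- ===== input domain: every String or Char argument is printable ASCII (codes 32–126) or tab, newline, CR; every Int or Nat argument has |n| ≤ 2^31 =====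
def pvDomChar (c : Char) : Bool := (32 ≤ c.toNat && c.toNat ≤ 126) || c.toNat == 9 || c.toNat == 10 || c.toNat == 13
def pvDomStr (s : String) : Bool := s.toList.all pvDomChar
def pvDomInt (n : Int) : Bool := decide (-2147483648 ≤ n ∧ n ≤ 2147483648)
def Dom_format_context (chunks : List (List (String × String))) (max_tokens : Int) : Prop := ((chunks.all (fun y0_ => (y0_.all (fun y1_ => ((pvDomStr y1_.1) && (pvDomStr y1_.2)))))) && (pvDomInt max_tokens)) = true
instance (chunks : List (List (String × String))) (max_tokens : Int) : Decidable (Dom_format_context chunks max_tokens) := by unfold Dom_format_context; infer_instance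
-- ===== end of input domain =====

-- B finds the cutoff by binary search (bisect_right) over the nondecreasing prefix sums of the
-- formatted parts' lengths instead of A's linear scan-with-break; alternative algorithm, not faster.


-- ===== PORT A =====
-- the f-string "[{i}] Source: {source} (page {page})\n{text}" with the three .get defaults
def pvPart (i : Int) (chunk : List (String × String)) : String :=
  let source := PySem.Dict.getD (PySem.Dict.mk chunk) "filename" "Unknown"
  let page := PySem.Dict.getD (PySem.Dict.mk chunk) "page_number" "?"
  let text := PySem.Dict.getD (PySem.Dict.mk chunk) "text" ""
  "[" ++ PySem.Int.toStr i ++ "] Source: " ++ source ++ " (page " ++ page ++ ")\n" ++ text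

-- A's for-loop: state = (context_parts, total_chars); break returns the parts collected so far
def fcLoopA (budget : Int) : List (List (String × String)) → Int → List String → Int → List String
  | [], _, parts, _ => parts
  | chunk :: rest, i, parts, total =>
    let part := pvPart i chunk
    if budget < total + PySem.Str.len part then parts
    else fcLoopA budget rest (i + 1) (parts ++ [part]) (total + PySem.Str.len part)

def format_context (chunks : List (List (String × String))) (max_tokens : Int) : String :=
  PySem.Str.join "\n\n---\n\n" (fcLoopA (max_tokens * 4) chunks 1 [] 0)

-- ===== PORT B =====
-- the list comprehension over enumerate(chunks, 1)
def pvParts : List (List (String × String)) → Int → List String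
  | [], _ => []
  | chunk :: rest, i => pvPart i chunk :: pvParts rest (i + 1)

-- itertools.accumulate of the lengths, with running sum acc
def pvAccumulate : List Int → Int → List Int
  | [], _ => []
  | x :: xs, acc => (acc + x) :: pvAccumulate xs (acc + x)

-- bisect.bisect_right(a, x): lo=0, hi=len(a); while lo<hi: mid=(lo+hi)//2;
--   if x < a[mid]: hi=mid else: lo=mid+1; return lo  (indices are in range, so getD is exact)
def pvBisectRight (a : List Int) (x : Int) (lo hi : Nat) : Nat :=
  if h : lo < hi then
    let mid := (lo + hi) / 2
    if x < a.getD mid 0 then pvBisectRight a x lo mid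
    else pvBisectRight a x (mid + 1) hi
  else lo
termination_by hi - lo
decreasing_by all_goals omega

def format_context_alt (chunks : List (List (String × String))) (max_tokens : Int) : String :=
  let parts := pvParts chunks 1
  let cums := pvAccumulate (parts.map PySem.Str.len) 0
  let cutoff := pvBisectRight cums (max_tokens * 4) 0 cums.length
  PySem.Str.join "\n\n---\n\n" (parts.take cutoff)

-- ===== PRECONDITION & SPEC =====
def Spec_format_context (chunks : List (List (String × String))) (max_tokens : Int) (out : String) : Prop := out = format_context_alt chunks max_tokens
instance (chunks : List (List (String × String))) (max_tokens : Int) (out : String) : Decidable (Spec_format_context chunks max_tokens out) := by unfold Spec_format_context; infer_instance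

-- ===== CLAIM (what is proved, stated in full; the proofs are below) =====
def Claim_equal_format_context : Prop := ∀ (chunks : List (List (String × String))) (max_tokens : Int), Dom_format_context chunks max_tokens → Spec_format_context chunks max_tokens (format_context chunks max_tokens)

-- ===== LEMMAS AND PROOFS =====

-- t = first index of a whose value exceeds x (or a.length): everything before t is ≤ x
def pvCut (a : List Int) (x : Int) : Nat := ((a.findIdx? (fun c => x < c)).getD a.length)

theorem pvCut_le_length (a : List Int) (x : Int) : pvCut a x ≤ a.length := by
  induction a with
  | nil => simp [pvCut]
  | cons y ys ih =>
    simp only [pvCut, List.findIdx?_cons, List.length_cons]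
    by_cases h : x < y
    · simp [h]
    · simp only [h, decide_false]
      simp only [pvCut] at ih
      cases hfi : (ys.findIdx? (fun c => x < c)) with
      | none => simp
      | some k =>
        have hk := ih
        unfold pvCut at hk
        rw [hfi] at hk
        simp only [Option.getD_some] at hk
        simp only [Bool.false_eq_true, if_false, Option.map_some, Option.getD_some]
        omega

theorem pvCut_before (a : List Int) (x : Int) :
    ∀ i, i < pvCut a x → a.getD i 0 ≤ x := by
  induction a with
  | nil => simp [pvCut]
  | cons y ys ih =>
    intro i hi
    simp only [pvCut, List.findIdx?_cons] at hi
    by_cases h : x < y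
    · simp [h] at hi
    · simp only [h, decide_false] at hi
      cases i with
      | zero => simpa using le_of_not_gt h
      | succ j =>
        simp only [List.getD_cons_succ]
        apply ih
        simp only [pvCut]
        cases hfi : (ys.findIdx? (fun c => x < c)) with
        | none =>
          simp [hfi] at hi ⊢; omega
        | some k =>
          simp [hfi] at hi ⊢; omega

theorem pvCut_after (a : List Int) (x : Int)
    (hmono : List.Pairwise (· ≤ ·) a) :
    ∀ i, pvCut a x ≤ i → i < a.length → x < a.getD i 0 := by
  induction a with
  | nil => simp
  | cons y ys ih =>
    intro i hti hlen
    rcases List.pairwise_cons.mp hmono with ⟨hy, hys⟩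
    simp only [pvCut, List.findIdx?_cons] at hti
    by_cases h : x < y
    · -- pvCut = 0; a[i] ≥ y > x for all i (monotone)
      cases i with
      | zero => simpa using h
      | succ j =>
        have hj : j < ys.length := by simpa using hlen
        simp only [List.getD_cons_succ]
        rw [List.getD_eq_getElem ys 0 hj]
        exact lt_of_lt_of_le h (hy _ (List.getElem_mem hj))
    · simp only [h, decide_false] at hti
      cases i with
      | zero =>
        exfalso
        cases hfi : (ys.findIdx? (fun c => x < c)) with
        | none => simp [hfi] at hti
        | some k => simp [hfi] at hti
      | succ j =>
        simp only [List.getD_cons_succ]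
        apply ih hys
        · simp only [pvCut]
          cases hfi : (ys.findIdx? (fun c => x < c)) with
          | none => simp [hfi] at hti ⊢; omega
          | some k => simp [hfi] at hti ⊢; omega
        · simpa using hlen

-- the binary search returns pvCut whenever the invariant lo ≤ pvCut ≤ hi ≤ length holds (a monotone)
theorem pvBisectRight_eq_pvCut (a : List Int) (x : Int)
    (hmono : List.Pairwise (· ≤ ·) a) :
    ∀ lo hi, lo ≤ pvCut a x → pvCut a x ≤ hi → hi ≤ a.length →
      pvBisectRight a x lo hi = pvCut a x := by
  intro lo hi
  induction hn : hi - lo using Nat.strong_induction_on generalizing lo hi with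
  | _ n ih =>
    intro hlo hhi hlen
    unfold pvBisectRight
    by_cases h : lo < hi
    · simp only [h, dif_pos]
      set mid := (lo + hi) / 2 with hmid
      have hmlt : mid < hi := by omega
      have hmlo : lo ≤ mid := by omega
      by_cases hc : x < a.getD mid 0
      · -- pvCut ≤ mid (contrapositive of pvCut_before)
        have : pvCut a x ≤ mid := by
          by_contra hlt
          exact absurd (pvCut_before a x mid (by omega)) (not_le.mpr hc)
        simp only [hc, if_pos]
        exact ih (mid - lo) (by omega) lo mid rfl hlo this (by omega)
      · -- mid + 1 ≤ pvCut (contrapositive of pvCut_after)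
        have : mid + 1 ≤ pvCut a x := by
          by_contra hlt
          exact hc (pvCut_after a x hmono mid (by omega) (by omega))
        simp only [hc, if_false]
        exact ih (hi - (mid + 1)) (by omega) (mid + 1) hi rfl this hhi hlen
    · simp only [h, dif_neg, not_false_iff]
      omega

-- pvAccumulate of nonnegative increments is bounded below by acc
theorem pvAccumulate_lb (xs : List Int) (acc : Int) (hnn : ∀ y ∈ xs, 0 ≤ y) :
    ∀ c ∈ pvAccumulate xs acc, acc ≤ c := by
  induction xs generalizing acc with
  | nil => simp [pvAccumulate]
  | cons x xs ih =>
    intro c hc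
    simp only [pvAccumulate, List.mem_cons] at hc
    have hx : 0 ≤ x := hnn x (List.mem_cons_self ..)
    rcases hc with rfl | hc
    · omega
    · have := ih (acc + x) (fun y hy => hnn y (List.mem_cons_of_mem _ hy)) c hc
      omega

theorem pvAccumulate_mono (xs : List Int) (acc : Int) (hnn : ∀ y ∈ xs, 0 ≤ y) :
    List.Pairwise (· ≤ ·) (pvAccumulate xs acc) := by
  induction xs generalizing acc with
  | nil => simp [pvAccumulate]
  | cons x xs ih =>
    simp only [pvAccumulate, List.pairwise_cons]
    refine ⟨fun c hc => ?_, ih (acc + x) (fun y hy => hnn y (List.mem_cons_of_mem _ hy))⟩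
    exact pvAccumulate_lb xs (acc + x) (fun y hy => hnn y (List.mem_cons_of_mem _ hy)) c hc

-- A's loop equals: take, from the parts numbered from i, the prefix up to the first
-- cumulative length (offset by the running total) that exceeds the budget.
theorem fcLoopA_eq (budget : Int) :
    ∀ (chunks : List (List (String × String))) (i : Int) (parts : List String) (total : Int),
      fcLoopA budget chunks i parts total =
        parts ++ (pvParts chunks i).take
          (pvCut (pvAccumulate ((pvParts chunks i).map PySem.Str.len) total) budget) := by
  intro chunks
  induction chunks with
  | nil => intro i parts total; simp [fcLoopA, pvParts, pvAccumulate, pvCut]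
  | cons chunk rest ih =>
    intro i parts total
    simp only [fcLoopA, pvParts, pvAccumulate, List.map_cons, pvCut, List.findIdx?_cons,
      List.length_cons]
    by_cases h : budget < total + PySem.Str.len (pvPart i chunk)
    · simp only [PySem.Str.len, String.length_toList] at h
      simp [h]
    · simp only [PySem.Str.len, String.length_toList] at h
      simp only [decide_eq_true_eq]
      rw [ih (i + 1) (parts ++ [pvPart i chunk]) (total + PySem.Str.len (pvPart i chunk))]
      simp only [pvCut]
      cases hfi : (pvAccumulate ((pvParts rest (i + 1)).map PySem.Str.len)
          (total + PySem.Str.len (pvPart i chunk))).findIdx? (fun c => budget < c) with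
      | none => simp [h, List.take_succ_cons]
      | some k => simp [h, List.take_succ_cons]

-- ===== VERDICT (by name: the statement is the Claim_ definition above) =====
theorem format_context_spec : Claim_equal_format_context := by
  intro chunks max_tokens _
  unfold Spec_format_context format_context format_context_alt
  rw [fcLoopA_eq]
  show PySem.Str.join "\n\n---\n\n" _ =
    PySem.Str.join "\n\n---\n\n" ((pvParts chunks 1).take
      (pvBisectRight (pvAccumulate ((pvParts chunks 1).map PySem.Str.len) 0) (max_tokens * 4) 0
        (pvAccumulate ((pvParts chunks 1).map PySem.Str.len) 0).length))
  have hnn : ∀ y ∈ (pvParts chunks 1).map PySem.Str.len, 0 ≤ y := by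
    intro y hy
    rcases List.mem_map.mp hy with ⟨p, _, rfl⟩
    simp [PySem.Str.len]
  have hmono := pvAccumulate_mono ((pvParts chunks 1).map PySem.Str.len) 0 hnn
  rw [pvBisectRight_eq_pvCut _ _ hmono 0 _ (Nat.zero_le _) (pvCut_le_length _ _) le_rfl]
  simp
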